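-- pv_equiv track=rewrite | github.com/klimente/homework | homework_3/convert_recur.py | convert
-- ===== SOURCE A (Python) =====
-- def convert(input_str):
--     """A function to convert string in int by using recursion
--     return an integer representing of all string
--
--     :param input_str: input string
--     :param input_str: str
--     :returns: int -- concatenation of a integer representing of input_string
--
--     >>>convert('abc')
--     979899
--     """
--     if input_str:
--         if len(input_str) < 2:
--             return ord(input_str[0])
--         power = 0
--         substr = convert(input_str[1:])
--         tmp = substr
--         while tmp > 0:
--             tmp = tmp // 10
--             power += 1
--         return ord(input_str[0])*(10**power) + substr
-- ===== SOURCE B (Python) =====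
-- def convert(input_str):
--     if not input_str:
--         return None
--     result = 0
--     for c in input_str:
--         d = ord(c)
--         tmp = d
--         power = 0
--         while tmp > 0:
--             tmp = tmp // 10
--             power += 1
--         result = result * (10 ** power) + d
--     return result
-- ===== Notes on version B (the rewrite author's own statement) =====
-- stated objective: faster
-- what changed: Replaces the tail recursion, which re-counts the decimal digits of the entire already-converted suffix at every level, by one left-to-right loop that shifts the accumulator by the digit count of just the current character's ord value.
import Mathlib
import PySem

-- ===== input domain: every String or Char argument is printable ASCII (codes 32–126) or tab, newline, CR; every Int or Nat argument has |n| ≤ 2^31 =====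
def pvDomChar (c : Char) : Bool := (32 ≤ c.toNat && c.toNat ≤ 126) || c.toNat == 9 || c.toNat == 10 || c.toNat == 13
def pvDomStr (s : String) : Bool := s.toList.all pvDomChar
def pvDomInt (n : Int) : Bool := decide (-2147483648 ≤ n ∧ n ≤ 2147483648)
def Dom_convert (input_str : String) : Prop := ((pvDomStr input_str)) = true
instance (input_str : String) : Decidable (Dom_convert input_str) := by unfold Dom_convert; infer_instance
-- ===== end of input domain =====

-- B replaces A's tail recursion by a single left-to-right loop; same result on the whole domain.

-- termination helper for the shared `while tmp > 0: tmp //= 10` loop (this loop appears verbatim in both A and B)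
theorem pvFd10_toNat_lt (t : Int) (h : 0 < t) : (PySem.Int.floordiv t 10).toNat < t.toNat := by
  rw [PySem.Int.floordiv_eq_ediv_of_pos (by norm_num : (0:Int) < 10)]
  omega

-- `while tmp > 0: tmp = tmp // 10; power += 1` — appears verbatim in both A and B
def pyDigitLoop (tmp : Int) (power : Nat) : Nat :=
  if h : 0 < tmp then pyDigitLoop (PySem.Int.floordiv tmp 10) (power + 1) else power
termination_by tmp.toNat
decreasing_by exact pvFd10_toNat_lt tmp h

-- ===== PORT A =====
def convertList : List Char → Option Int
  | [] => none                                   -- `if input_str:` falsy → implicit None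
  | c :: rest =>
    if (c :: rest).length < 2 then some (c.toNat : Int)   -- `return ord(input_str[0])`
    else
      match convertList rest with                -- `substr = convert(input_str[1:])`
      | none => none                             -- unreachable: rest is nonempty here
      | some substr =>
        some ((c.toNat : Int) * 10 ^ (pyDigitLoop substr 0) + substr)

def convert (input_str : String) : Option Int := convertList input_str.toList

-- ===== PORT B =====
def convert_alt (input_str : String) : Option Int :=
  if input_str.toList = [] then none
  else
    some (input_str.toList.foldl
      (fun result c =>
        result * 10 ^ (pyDigitLoop (c.toNat : Int) 0) + (c.toNat : Int)) 0)

-- ===== PRECONDITION & SPEC =====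
def Spec_convert (input_str : String) (out : Option Int) : Prop := out = convert_alt input_str
instance (input_str : String) (out : Option Int) : Decidable (Spec_convert input_str out) := by unfold Spec_convert; infer_instance

-- ===== CLAIM (what is proved, stated in full; the proofs are below) =====
def Claim_equal_convert : Prop := ∀ (input_str : String), Dom_convert input_str → Spec_convert input_str (convert input_str)

-- ===== LEMMAS AND PROOFS =====

def pvStep (result : Int) (c : Char) : Int :=
  result * 10 ^ (pyDigitLoop (c.toNat : Int) 0) + (c.toNat : Int)

def pvDsum (l : List Char) : Nat := (l.map (fun c => pyDigitLoop (c.toNat : Int) 0)).sum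

-- the loop only adds to `power`
theorem pyDigitLoop_add : ∀ (n : Nat) (t : Int), t.toNat = n → ∀ p, pyDigitLoop t p = p + pyDigitLoop t 0 := by
  intro n
  induction n using Nat.strong_induction_on with
  | _ n ih =>
    intro t ht p
    by_cases h : 0 < t
    · have hlt := pvFd10_toNat_lt t h
      rw [pyDigitLoop, dif_pos h]
      conv_rhs => rw [pyDigitLoop, dif_pos h]
      rw [ih _ (by omega) _ rfl (p + 1), ih _ (by omega) _ rfl (0 + 1)]
      omega
    · rw [pyDigitLoop, dif_neg h]
      conv_rhs => rw [pyDigitLoop, dif_neg h]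
      omega

theorem pyDigitLoop_ub : ∀ (n : Nat) (t : Int), t.toNat = n → 0 ≤ t → t < 10 ^ pyDigitLoop t 0 := by
  intro n
  induction n using Nat.strong_induction_on with
  | _ n ih =>
    intro t ht h0
    by_cases h : 0 < t
    · have hlt := pvFd10_toNat_lt t h
      have hfd : PySem.Int.floordiv t 10 = t / 10 :=
        PySem.Int.floordiv_eq_ediv_of_pos (by norm_num)
      have hub := ih _ (by omega) (PySem.Int.floordiv t 10) rfl (by rw [hfd]; omega)
      rw [pyDigitLoop, dif_pos h,
        pyDigitLoop_add (PySem.Int.floordiv t 10).toNat _ rfl (0 + 1)]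
      rw [hfd] at hub ⊢
      have h10 : (10:Int) ^ (0 + 1 + pyDigitLoop (t / 10) 0) = 10 * 10 ^ pyDigitLoop (t / 10) 0 := by
        rw [pow_add]; norm_num
      rw [h10]
      omega
    · rw [pyDigitLoop, dif_neg h]
      simpa using (by omega : t < 1)

-- digit count of a decimal concatenation c·10^m + r
theorem pyDigitLoop_concat : ∀ (m : Nat) (c r : Int), 1 ≤ c → 0 ≤ r → r < 10 ^ m →
    pyDigitLoop (c * 10 ^ m + r) 0 = m + pyDigitLoop c 0 := by
  intro m
  induction m with
  | zero =>
    intro c r hc hr hru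
    rw [pow_zero] at hru
    have hr0 : r = 0 := by omega
    subst hr0
    simp
  | succ m ih =>
    intro c r hc hr hru
    have hn : 0 < c * 10 ^ (m + 1) + r := by positivity
    rw [pyDigitLoop, dif_pos hn]
    have hfd : PySem.Int.floordiv (c * 10 ^ (m + 1) + r) 10 = (c * 10 ^ (m + 1) + r) / 10 :=
      PySem.Int.floordiv_eq_ediv_of_pos (by norm_num)
    have hq : (c * 10 ^ (m + 1) + r) / 10 = c * 10 ^ m + r / 10 := by
      have hsplit : c * 10 ^ (m + 1) = (c * 10 ^ m) * 10 := by ring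
      rw [hsplit]; omega
    have hrub : r / 10 < 10 ^ m := by
      have hsplit : (10:Int) ^ (m + 1) = 10 ^ m * 10 := by ring
      rw [hsplit] at hru; omega
    rw [hfd, hq, pyDigitLoop_add (c * 10 ^ m + r / 10).toNat _ rfl (0 + 1),
        ih c (r / 10) hc (by omega) hrub]
    omega

theorem pvFoldl_shift (l : List Char) : ∀ acc : Int,
    l.foldl pvStep acc = acc * 10 ^ pvDsum l + l.foldl pvStep 0 := by
  induction l with
  | nil => intro acc; simp [pvDsum]
  | cons c l ih =>
    intro acc
    simp only [List.foldl_cons]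
    rw [ih (pvStep acc c), ih (pvStep 0 c)]
    have hd : pvDsum (c :: l) = pyDigitLoop (c.toNat : Int) 0 + pvDsum l := by
      simp [pvDsum]
    rw [hd, pow_add]
    simp only [pvStep, pvDsum]
    ring

theorem pvFoldl_head (c : Char) (l : List Char) :
    List.foldl pvStep 0 (c :: l) = (c.toNat : Int) * 10 ^ pvDsum l + List.foldl pvStep 0 l := by
  rw [List.foldl_cons, pvFoldl_shift l (pvStep 0 c)]
  simp [pvStep]

theorem pvN_bounds (l : List Char) : 0 ≤ l.foldl pvStep 0 ∧ l.foldl pvStep 0 < 10 ^ pvDsum l := by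
  induction l with
  | nil => simp [pvDsum]
  | cons c l ih =>
    rw [pvFoldl_head]
    have hc0 : (0:Int) ≤ (c.toNat : Int) := by positivity
    have hcub : (c.toNat : Int) < 10 ^ pyDigitLoop (c.toNat : Int) 0 :=
      pyDigitLoop_ub (c.toNat : Int).toNat _ rfl hc0
    have hsum : pvDsum (c :: l) = pyDigitLoop (c.toNat : Int) 0 + pvDsum l := by
      simp [pvDsum]
    rw [hsum, pow_add]
    have hp : (0:Int) < 10 ^ pvDsum l := by positivity
    constructor
    · nlinarith [ih.1]
    · nlinarith [ih.1, ih.2]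

theorem pvDigits_of_N (l : List Char) (hne : l ≠ []) (h1 : ∀ c ∈ l, 1 ≤ (c.toNat : Int)) :
    pyDigitLoop (l.foldl pvStep 0) 0 = pvDsum l := by
  induction l with
  | nil => exact absurd rfl hne
  | cons c l ih =>
    cases l with
    | nil => simp [pvStep, pvDsum, List.foldl]
    | cons d l' =>
      have hb := pvN_bounds (d :: l')
      rw [pvFoldl_head,
        pyDigitLoop_concat (pvDsum (d :: l')) _ _ (h1 c List.mem_cons_self) hb.1 hb.2]
      have hsum : pvDsum (c :: d :: l') = pyDigitLoop (c.toNat : Int) 0 + pvDsum (d :: l') := by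
        simp [pvDsum]
      omega

theorem pvMain (l : List Char) (hne : l ≠ []) (h1 : ∀ c ∈ l, 1 ≤ (c.toNat : Int)) :
    convertList l = some (l.foldl pvStep 0) := by
  induction l with
  | nil => exact absurd rfl hne
  | cons c l ih =>
    cases l with
    | nil => simp [convertList, pvStep, List.foldl]
    | cons d l' =>
      have h1' : ∀ x ∈ d :: l', 1 ≤ (x.toNat : Int) := fun x hx => h1 x (List.mem_cons_of_mem _ hx)
      have hrec := ih (by simp) h1'
      have hdig := pvDigits_of_N (d :: l') (by simp) h1'
      rw [convertList]
      rw [if_neg (by simp)]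
      rw [hrec]
      show some ((c.toNat : Int) * 10 ^ (pyDigitLoop (List.foldl pvStep 0 (d :: l')) 0)
              + List.foldl pvStep 0 (d :: l'))
        = some (List.foldl pvStep 0 (c :: d :: l'))
      rw [hdig, pvFoldl_head c (d :: l')]

-- ===== VERDICT (by name: the statement is the Claim_ definition above) =====
theorem convert_spec : Claim_equal_convert := by
  intro s hdom
  unfold Spec_convert convert convert_alt
  cases h : s.toList with
  | nil => simp [convertList]
  | cons c l =>
    rw [if_neg (by simp)]
    have h1 : ∀ x ∈ c :: l, 1 ≤ (x.toNat : Int) := by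
      intro x hx
      have hd : pvDomChar x = true := by
        unfold Dom_convert pvDomStr at hdom
        rw [h, List.all_eq_true] at hdom
        exact hdom x hx
      unfold pvDomChar at hd
      simp at hd
      omega
    rw [pvMain (c :: l) (by simp) h1]
    rfl
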